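-- pv_equiv track=rewrite | github.com/steveburton4/advent_of_code_2024 | Day 4/day4.py | find_xmas_instances_vertical
-- ===== SOURCE A (Python) =====
-- def find_xmas_instances_vertical(lines_to_check):
--     total_instances_vertical = 0
--     for line_number in range(0, len(lines_to_check)):
--         for character_number in range(0, len(lines_to_check[line_number])):
--             if len(lines_to_check) > (line_number + 3):
--                 check_string = lines_to_check[line_number][character_number] \
--                 + lines_to_check[line_number + 1][character_number] \
--                 + lines_to_check[line_number + 2][character_number] \
--                 + lines_to_check[line_number + 3][character_number]
--
--                 if "XMAS" == check_string or "SAMX" == check_string: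
--                     total_instances_vertical += 1
--
--     return total_instances_vertical
-- ===== SOURCE B (Python) =====
-- def find_xmas_instances_vertical(lines_to_check):
--     width = max(map(len, lines_to_check), default=0)
--     total = 0
--     for c in range(width):
--         column = ''.join(line[c] if c < len(line) else '.' for line in lines_to_check)
--         total += column.count('XMAS') + column.count('SAMX')
--     return total
-- ===== Notes on version B (the rewrite author's own statement) =====
-- stated objective: idiomatic
-- what changed: A's row-major double index loop that concatenates and compares a 4-character window at every cell is replaced by a column-major pass: each column is materialised once as a string (short rows padded with '.', which occurs in neither pattern) and the answer is the sum of column.count('XMAS') + column.count('SAMX').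
import Mathlib
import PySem

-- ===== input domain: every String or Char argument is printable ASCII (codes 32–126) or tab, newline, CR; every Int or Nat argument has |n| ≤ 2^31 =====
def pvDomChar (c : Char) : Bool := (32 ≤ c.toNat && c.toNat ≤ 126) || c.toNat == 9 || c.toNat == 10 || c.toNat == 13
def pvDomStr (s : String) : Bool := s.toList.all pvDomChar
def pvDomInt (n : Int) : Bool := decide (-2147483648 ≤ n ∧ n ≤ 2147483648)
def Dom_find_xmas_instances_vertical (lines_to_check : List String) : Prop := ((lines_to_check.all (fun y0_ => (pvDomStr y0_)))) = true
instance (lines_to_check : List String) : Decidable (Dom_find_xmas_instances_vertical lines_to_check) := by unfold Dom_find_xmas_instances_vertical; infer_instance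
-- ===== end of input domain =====

-- B replaces A's row-major per-cell 4-character window comparison by a column-major pass: each
-- column is built once as a character string ('.'-padded where a row is too short — '.' occurs in
-- neither pattern) and the non-overlapping substring counts of "XMAS" and "SAMX" are summed.
-- Same return value wherever A returns (Pre_ excludes exactly A's IndexError inputs).

-- ===== PORT A =====
def find_xmas_instances_vertical (lines_to_check : List String) : Int :=
  (PySem.List.pyRange 0 (PySem.List.len lines_to_check) 1).foldl
    (fun total ln =>
      (PySem.List.pyRange 0 (PySem.Str.len (PySem.List.pyGetD lines_to_check ln "")) 1).foldl
        (fun total cn =>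
          if PySem.List.len lines_to_check > ln + 3 then
            -- check_string: the four column characters concatenated
            let cs : List Char :=
              [PySem.List.pyGetD (PySem.List.pyGetD lines_to_check ln "").toList cn ' ',
               PySem.List.pyGetD (PySem.List.pyGetD lines_to_check (ln + 1) "").toList cn ' ',
               PySem.List.pyGetD (PySem.List.pyGetD lines_to_check (ln + 2) "").toList cn ' ',
               PySem.List.pyGetD (PySem.List.pyGetD lines_to_check (ln + 3) "").toList cn ' ']
            if "XMAS".toList = cs ∨ "SAMX".toList = cs then total + 1 else total
          else total)
        total)
    0

-- ===== PORT B =====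
def find_xmas_instances_vertical_alt (lines_to_check : List String) : Int :=
  let width : Int := PySem.List.maxD (lines_to_check.map PySem.Str.len) (fun x => x) 0
  (PySem.List.pyRange 0 width 1).foldl
    (fun total c =>
      let column : List Char :=
        lines_to_check.map (fun line =>
          if c < PySem.Str.len line then PySem.List.pyGetD line.toList c '.' else '.')
      total + ((PySem.Chars.count column "XMAS".toList : Nat) : Int)
            + ((PySem.Chars.count column "SAMX".toList : Nat) : Int))
    0

-- ===== PRECONDITION & SPEC =====
-- Pre_ holds exactly when the Python A returns: A raises IndexError iff some row r that starts a
-- full 4-row window (r+3 < len) is strictly longer than one of the three rows below it.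
def Pre_find_xmas_instances_vertical (lines_to_check : List String) : Prop :=
  ∀ r, r < lines_to_check.length → r + 3 < lines_to_check.length →
    (lines_to_check.getD r "").toList.length ≤ (lines_to_check.getD (r + 1) "").toList.length ∧
    (lines_to_check.getD r "").toList.length ≤ (lines_to_check.getD (r + 2) "").toList.length ∧
    (lines_to_check.getD r "").toList.length ≤ (lines_to_check.getD (r + 3) "").toList.length
instance (lines_to_check : List String) : Decidable (Pre_find_xmas_instances_vertical lines_to_check) := by
  unfold Pre_find_xmas_instances_vertical; infer_instance

def pvWitness_find_xmas_instances_vertical : List String := ["XA", "MA", "AA", "SA"]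

def Spec_find_xmas_instances_vertical (lines_to_check : List String) (out : Int) : Prop := out = find_xmas_instances_vertical_alt lines_to_check
instance (lines_to_check : List String) (out : Int) : Decidable (Spec_find_xmas_instances_vertical lines_to_check out) := by unfold Spec_find_xmas_instances_vertical; infer_instance

-- ===== CLAIM (what is proved, stated in full; the proofs are below) =====
def Claim_equal_find_xmas_instances_vertical : Prop := ∀ (lines_to_check : List String), Dom_find_xmas_instances_vertical lines_to_check → Pre_find_xmas_instances_vertical lines_to_check → Spec_find_xmas_instances_vertical lines_to_check (find_xmas_instances_vertical lines_to_check)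

-- ===== LEMMAS AND PROOFS =====

-- hit test: is a 4-char column word XMAS or SAMX?
def pvHit (w : List Char) : Bool := decide (w = "XMAS".toList ∨ w = "SAMX".toList)

-- the column word A reads at window row k, column cn
def pvColWord (A B C D : List Char) (cn : Nat) : List Char :=
  [A.getD cn ' ', B.getD cn ' ', C.getD cn ' ', D.getD cn ' ']

-- per-row count on A's side
def pvHRow (xs : List String) (k : Nat) : Int :=
  if k + 3 < xs.length then
    (((List.range (xs.getD k "").toList.length)).countP
      (fun cn => pvHit (pvColWord (xs.getD k "").toList (xs.getD (k + 1) "").toList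
        (xs.getD (k + 2) "").toList (xs.getD (k + 3) "").toList cn)) : Int)
  else 0

lemma pv_inner_eq (xs : List String) (k : Nat) (t : Int) :
    (PySem.List.pyRange 0 (PySem.Str.len (PySem.List.pyGetD xs (k : Int) "")) 1).foldl
        (fun total cn =>
          if PySem.List.len xs > (k : Int) + 3 then
            let cs : List Char :=
              [PySem.List.pyGetD (PySem.List.pyGetD xs (k : Int) "").toList cn ' ',
               PySem.List.pyGetD (PySem.List.pyGetD xs ((k : Int) + 1) "").toList cn ' ',
               PySem.List.pyGetD (PySem.List.pyGetD xs ((k : Int) + 2) "").toList cn ' ',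
               PySem.List.pyGetD (PySem.List.pyGetD xs ((k : Int) + 3) "").toList cn ' ']
            if "XMAS".toList = cs ∨ "SAMX".toList = cs then total + 1 else total
          else total)
        t = t + pvHRow xs k := by
  by_cases hg : k + 3 < xs.length
  · simp only [PySem.List.pyGetD_natCast, PySem.Str.len_eq, PySem.List.len_eq,
      PySem.List.pyRange_one]
    have hgi : ((xs.length : Int) > (k : Int) + 3) := by exact_mod_cast hg
    simp only [if_pos hgi]
    have h1 : ((k : Int) + 1) = ((k + 1 : Nat) : Int) := by push_cast; ring
    have h2 : ((k : Int) + 2) = ((k + 2 : Nat) : Int) := by push_cast; ring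
    have h3 : ((k : Int) + 3) = ((k + 3 : Nat) : Int) := by push_cast; ring
    rw [h1, h2, h3]
    simp only [PySem.List.pyGetD_natCast]
    rw [List.foldl_map]
    simp only [zero_add, PySem.List.pyGetD_natCast]
    rw [PySem.List.foldl_ite_add_one]
    simp only [pvHRow, if_pos hg, Int.sub_zero, Int.toNat_natCast]
    congr 2
    apply List.countP_congr
    intro cn _
    simp [pvHit, pvColWord, @eq_comm (List Char)]
  · have hgi : ¬ (PySem.List.len xs > (k : Int) + 3) := by
      simp only [PySem.List.len_eq]; omega
    simp only [if_neg hgi]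
    rw [List.foldl_fixed]
    simp [pvHRow, if_neg hg]

lemma pv_a_eq (xs : List String) :
    find_xmas_instances_vertical xs = ((List.range xs.length).map (pvHRow xs)).sum := by
  unfold find_xmas_instances_vertical
  rw [show PySem.List.len xs = ((xs.length : Nat) : Int) from PySem.List.len_eq xs,
      PySem.List.pyRange_one]
  simp only [Int.sub_zero, Int.toNat_natCast]
  rw [List.foldl_map]
  have h2 : (List.range xs.length).foldl (fun (t : Int) (k : Nat) => t + pvHRow xs k) 0
      = ((List.range xs.length).map (pvHRow xs)).sum := by
    rw [PySem.List.foldl_add, zero_add]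
  rw [← h2]
  apply List.foldl_ext
  intro t k _
  simp only [zero_add]
  have h := pv_inner_eq xs k t
  rw [show PySem.List.len xs = ((xs.length : Nat) : Int) from PySem.List.len_eq xs] at h
  exact h

-- ---------- occurrence counting: Python str.count for a non-self-overlapping pattern ----------

-- number of positions where p starts in s
def pvOcc (p : List Char) : List Char → Nat
  | [] => 0
  | h :: t => (if p.isPrefixOf (h :: t) then 1 else 0) + pvOcc p t

lemma pv_go_eq (p : List Char) (hne : p ≠ [])
    (hstep : ∀ s : List Char, p.isPrefixOf s = true → pvOcc p (s.drop 1) = pvOcc p (s.drop p.length)) :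
    ∀ (fuel : Nat) (s : List Char) (acc : Nat), s.length ≤ fuel →
      PySem.Chars.count.go p fuel s acc = acc + pvOcc p s := by
  intro fuel
  induction fuel with
  | zero =>
    intro s acc hs
    have : s = [] := by cases s <;> simp_all
    subst this
    simp [PySem.Chars.count.go, pvOcc]
  | succ fuel ih =>
    intro s acc hs
    cases s with
    | nil => simp [PySem.Chars.count.go, pvOcc]
    | cons h t =>
      rw [PySem.Chars.count.go.eq_def]
      simp only []
      by_cases hp : p.isPrefixOf (h :: t) = true
      · rw [if_pos hp]
        have hlen : (List.drop p.length (h :: t)).length ≤ fuel := by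
          simp only [List.length_drop, List.length_cons] at *
          have : 1 ≤ p.length := by cases p <;> simp_all
          omega
        rw [ih _ _ hlen]
        have : pvOcc p (h :: t) = 1 + pvOcc p (List.drop p.length (h :: t)) := by
          have h1 : pvOcc p (h :: t) = 1 + pvOcc p t := by simp [pvOcc, hp]
          have h2 : pvOcc p t = pvOcc p (List.drop p.length (h :: t)) := by
            have := hstep (h :: t) hp
            simpa using this
          omega
        omega
      · rw [if_neg hp]
        rw [ih _ _ (by simp at hs ⊢; omega)]
        have : pvOcc p (h :: t) = pvOcc p t := by simp [pvOcc, hp]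
        omega

lemma pv_count_occ (p : List Char) (hne : p ≠ [])
    (hstep : ∀ s : List Char, p.isPrefixOf s = true → pvOcc p (s.drop 1) = pvOcc p (s.drop p.length))
    (s : List Char) : PySem.Chars.count s p = pvOcc p s := by
  unfold PySem.Chars.count
  rw [if_neg (by simpa using hne)]
  simpa using pv_go_eq p hne hstep s.length s 0 le_rfl

lemma pv_stepX : ∀ s : List Char, "XMAS".toList.isPrefixOf s = true →
    pvOcc "XMAS".toList (s.drop 1) = pvOcc "XMAS".toList (s.drop "XMAS".toList.length) := by
  intro s h
  rcases s with _ | ⟨a, _ | ⟨b, _ | ⟨c, _ | ⟨d, rest⟩⟩⟩⟩ <;> simp_all [List.isPrefixOf]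
  obtain ⟨rfl, rfl, rfl, rfl⟩ := h
  simp [pvOcc, List.isPrefixOf]

lemma pv_stepS : ∀ s : List Char, "SAMX".toList.isPrefixOf s = true →
    pvOcc "SAMX".toList (s.drop 1) = pvOcc "SAMX".toList (s.drop "SAMX".toList.length) := by
  intro s h
  rcases s with _ | ⟨a, _ | ⟨b, _ | ⟨c, _ | ⟨d, rest⟩⟩⟩⟩ <;> simp_all [List.isPrefixOf]
  obtain ⟨rfl, rfl, rfl, rfl⟩ := h
  simp [pvOcc, List.isPrefixOf]

lemma pvOcc_countP (p : List Char) (s : List Char) :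
    pvOcc p s = (List.range s.length).countP (fun i => p.isPrefixOf (s.drop i)) := by
  induction s with
  | nil => simp [pvOcc]
  | cons h t ih =>
    simp only [pvOcc, List.length_cons, List.range_succ_eq_map, List.countP_cons,
      List.countP_map, List.drop_zero]
    rw [ih]
    have hc : List.countP ((fun i => p.isPrefixOf (List.drop i (h :: t))) ∘ Nat.succ)
        (List.range t.length) = List.countP (fun i => p.isPrefixOf (List.drop i t))
        (List.range t.length) := List.countP_congr (fun i _ => by simp [Function.comp])
    rw [hc]
    exact Nat.add_comm _ _

lemma pv_countP_sum (p : Nat → Bool) (k : Nat) :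
    ((List.range k).countP p : Nat) = ∑ i ∈ Finset.range k, if p i then 1 else 0 := by
  induction k with
  | zero => simp
  | succ n ih => rw [List.range_succ, Finset.sum_range_succ, List.countP_append, ih]; simp

-- ---------- B-side: column strings, width, and the pointwise window correspondence ----------

-- the padded column character of a row (what B's generator computes)
def pvF (c : Nat) (line : String) : Char :=
  if c < line.toList.length then line.toList.getD c '.' else '.'

-- does a vertical window start at row r in column c (read off B's padded column)?
def pvPt (xs : List String) (c r : Nat) : Bool :=
  "XMAS".toList.isPrefixOf ((xs.drop r).map (pvF c)) ||
  "SAMX".toList.isPrefixOf ((xs.drop r).map (pvF c))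

-- the width B iterates over
def pvW (xs : List String) : Nat :=
  (PySem.List.maxD (xs.map PySem.Str.len) (fun x => x) 0).toNat

lemma pv_max_some (ys : List Int) (y : Int) (hy : y ∈ ys) :
    ∃ m, PySem.List.max? ys (fun x => x) = some m ∧ y ≤ m := by
  cases hm : PySem.List.max? ys (fun x => x) with
  | none => rw [PySem.List.max?_eq_none_iff] at hm; subst hm; simp at hy
  | some m => exact ⟨m, rfl, PySem.List.max?_id_le hm y hy⟩

lemma pv_len_le_W (xs : List String) (r : Nat) (hr : r < xs.length) :
    (xs.getD r "").toList.length ≤ pvW xs := by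
  have hmem : PySem.Str.len (xs.getD r "") ∈ xs.map PySem.Str.len := by
    rw [List.getD_eq_getElem xs "" hr]
    exact List.mem_map_of_mem (List.getElem_mem hr)
  obtain ⟨m, hm, hle⟩ := pv_max_some _ _ hmem
  rw [PySem.Str.len_eq] at hle
  unfold pvW PySem.List.maxD
  rw [hm]
  simp only [Option.getD_some]
  omega

lemma pv_alt_sum (xs : List String) :
    find_xmas_instances_vertical_alt xs =
      ∑ c ∈ Finset.range (pvW xs),
        ((PySem.Chars.count (xs.map (pvF c)) "XMAS".toList
          + PySem.Chars.count (xs.map (pvF c)) "SAMX".toList : Nat) : Int) := by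
  unfold find_xmas_instances_vertical_alt
  simp only [PySem.List.pyRange_one, List.foldl_map]
  have hf : ∀ k : Nat, (fun line => if ((0:Int) + (k:Int)) < PySem.Str.len line
      then PySem.List.pyGetD line.toList ((0:Int) + (k:Int)) '.' else '.') = pvF k := by
    intro k
    funext line
    rw [zero_add, PySem.Str.len_eq, PySem.List.pyGetD_natCast]
    simp [pvF, Nat.cast_lt]
  simp only [hf, Int.sub_zero]
  have hb : (fun (x : Int) (y : Nat) => x
        + (PySem.Chars.count (List.map (pvF y) xs) "XMAS".toList : Int)
        + (PySem.Chars.count (List.map (pvF y) xs) "SAMX".toList : Int))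
      = fun x y => x + (((PySem.Chars.count (List.map (pvF y) xs) "XMAS".toList
        + PySem.Chars.count (List.map (pvF y) xs) "SAMX".toList : Nat)) : Int) := by
    funext x y
    push_cast
    ring
  rw [hb, PySem.List.foldl_add, zero_add]
  rfl

lemma pv_excl (L : List Char) :
    ¬ ("XMAS".toList.isPrefixOf L = true ∧ "SAMX".toList.isPrefixOf L = true) := by
  rintro ⟨h1, h2⟩
  rcases L with _ | ⟨a, t⟩ <;> simp_all [List.isPrefixOf]
  exact absurd (h1.1.trans h2.1.symm) (by decide)

lemma pv_cnt_col (xs : List String) (c : Nat) :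
    (PySem.Chars.count (xs.map (pvF c)) "XMAS".toList
      + PySem.Chars.count (xs.map (pvF c)) "SAMX".toList : Nat) =
    ∑ r ∈ Finset.range xs.length, (if pvPt xs c r then 1 else 0) := by
  rw [pv_count_occ "XMAS".toList (by decide) pv_stepX,
      pv_count_occ "SAMX".toList (by decide) pv_stepS,
      pvOcc_countP, pvOcc_countP, List.length_map,
      pv_countP_sum, pv_countP_sum, ← Finset.sum_add_distrib]
  apply Finset.sum_congr rfl
  intro r _
  simp only [← List.map_drop]
  unfold pvPt
  have hex := pv_excl ((xs.drop r).map (pvF c))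
  simp only [List.isPrefixOf_iff_prefix, not_and] at hex
  simp only [Bool.or_eq_true, List.isPrefixOf_iff_prefix]
  split_ifs <;> first | omega | tauto

lemma pv_drop4 (xs : List String) (r : Nat) (h : r + 3 < xs.length) (f : String → Char) :
    (xs.drop r).map f =
      f (xs.getD r "") :: f (xs.getD (r+1) "") :: f (xs.getD (r+2) "") :: f (xs.getD (r+3) "")
        :: (xs.drop (r+4)).map f := by
  rw [List.drop_eq_getElem_cons (by omega : r < xs.length),
      List.drop_eq_getElem_cons (by omega : r + 1 < xs.length),
      List.drop_eq_getElem_cons (by omega : r + 1 + 1 < xs.length),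
      List.drop_eq_getElem_cons (by omega : r + 1 + 1 + 1 < xs.length)]
  simp only [List.map_cons]
  rw [List.getD_eq_getElem xs "" (by omega : r < xs.length),
      List.getD_eq_getElem xs "" (by omega : r + 1 < xs.length),
      List.getD_eq_getElem xs "" (by omega : r + 2 < xs.length),
      List.getD_eq_getElem xs "" (by omega : r + 3 < xs.length)]

lemma pv_pre4 (a b c d w0 w1 w2 w3 : Char) (rest : List Char) :
    [a, b, c, d].isPrefixOf (w0 :: w1 :: w2 :: w3 :: rest) = true ↔
      (a = w0 ∧ b = w1 ∧ c = w2 ∧ d = w3) := by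
  simp [List.isPrefixOf]

lemma pv_fin (line : String) (c : Nat) (hc : c < line.toList.length) :
    pvF c line = line.toList.getD c ' ' := by
  simp only [pvF, if_pos hc]
  rw [List.getD_eq_getElem _ _ hc, List.getD_eq_getElem _ _ hc]

lemma pv_fout (line : String) (c : Nat) (hc : ¬ c < line.toList.length) :
    pvF c line = '.' := by
  unfold pvF
  rw [if_neg hc]

lemma pv_point (xs : List String) (hpre : Pre_find_xmas_instances_vertical xs)
    (c r : Nat) (hr : r < xs.length) :
    pvPt xs c r = true ↔
      (r + 3 < xs.length ∧ c < (xs.getD r "").toList.length ∧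
        pvHit (pvColWord (xs.getD r "").toList (xs.getD (r+1) "").toList
          (xs.getD (r+2) "").toList (xs.getD (r+3) "").toList c) = true) := by
  by_cases h4 : r + 3 < xs.length
  · have hd := pv_drop4 xs r h4 (pvF c)
    obtain ⟨l1, l2, l3⟩ := hpre r hr h4
    constructor
    · intro hpt
      unfold pvPt at hpt
      rw [hd] at hpt
      rcases (Bool.or_eq_true _ _).mp hpt with hX | hS
      · rw [show "XMAS".toList = ['X', 'M', 'A', 'S'] from rfl, pv_pre4] at hX
        obtain ⟨e0, e1, e2, e3⟩ := hX
        have hc : c < (xs.getD r "").toList.length := by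
          by_contra hnc
          rw [pv_fout _ _ hnc] at e0
          exact absurd e0 (by decide)
        have hc1 : c < (xs.getD (r+1) "").toList.length := lt_of_lt_of_le hc l1
        have hc2 : c < (xs.getD (r+2) "").toList.length := lt_of_lt_of_le hc l2
        have hc3 : c < (xs.getD (r+3) "").toList.length := lt_of_lt_of_le hc l3
        refine ⟨h4, hc, ?_⟩
        unfold pvHit pvColWord
        apply decide_eq_true
        left
        rw [← pv_fin _ _ hc, ← pv_fin _ _ hc1, ← pv_fin _ _ hc2, ← pv_fin _ _ hc3,
            ← e0, ← e1, ← e2, ← e3]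
        rfl
      · rw [show "SAMX".toList = ['S', 'A', 'M', 'X'] from rfl, pv_pre4] at hS
        obtain ⟨e0, e1, e2, e3⟩ := hS
        have hc : c < (xs.getD r "").toList.length := by
          by_contra hnc
          rw [pv_fout _ _ hnc] at e0
          exact absurd e0 (by decide)
        have hc1 : c < (xs.getD (r+1) "").toList.length := lt_of_lt_of_le hc l1
        have hc2 : c < (xs.getD (r+2) "").toList.length := lt_of_lt_of_le hc l2
        have hc3 : c < (xs.getD (r+3) "").toList.length := lt_of_lt_of_le hc l3
        refine ⟨h4, hc, ?_⟩
        unfold pvHit pvColWord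
        apply decide_eq_true
        right
        rw [← pv_fin _ _ hc, ← pv_fin _ _ hc1, ← pv_fin _ _ hc2, ← pv_fin _ _ hc3,
            ← e0, ← e1, ← e2, ← e3]
        rfl
    · rintro ⟨-, hc, hhit⟩
      have hc1 : c < (xs.getD (r+1) "").toList.length := lt_of_lt_of_le hc l1
      have hc2 : c < (xs.getD (r+2) "").toList.length := lt_of_lt_of_le hc l2
      have hc3 : c < (xs.getD (r+3) "").toList.length := lt_of_lt_of_le hc l3
      unfold pvHit pvColWord at hhit
      have hor := of_decide_eq_true hhit
      unfold pvPt
      rw [hd]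
      simp only [Bool.or_eq_true]
      rcases hor with hx | hs
      · left
        rw [show "XMAS".toList = ['X', 'M', 'A', 'S'] from rfl, pv_pre4,
            pv_fin _ _ hc, pv_fin _ _ hc1, pv_fin _ _ hc2, pv_fin _ _ hc3]
        simpa [eq_comm] using hx.symm
      · right
        rw [show "SAMX".toList = ['S', 'A', 'M', 'X'] from rfl, pv_pre4,
            pv_fin _ _ hc, pv_fin _ _ hc1, pv_fin _ _ hc2, pv_fin _ _ hc3]
        simpa [eq_comm] using hs.symm
  · constructor
    · intro hpt
      exfalso
      unfold pvPt at hpt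
      rcases (Bool.or_eq_true _ _).mp hpt with h | h <;>
      · have hle := (List.isPrefixOf_iff_prefix.mp h).length_le
        simp only [List.length_map, List.length_drop,
          show ("XMAS".toList).length = 4 from rfl,
          show ("SAMX".toList).length = 4 from rfl] at hle
        omega
    · rintro ⟨h, -⟩
      exact absurd h h4

lemma pv_hrow_sum (xs : List String) (hpre : Pre_find_xmas_instances_vertical xs)
    (r : Nat) (hr : r < xs.length) :
    pvHRow xs r = ((∑ c ∈ Finset.range (pvW xs), if pvPt xs c r then 1 else 0 : Nat) : Int) := by
  by_cases h4 : r + 3 < xs.length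
  · unfold pvHRow
    rw [if_pos h4]
    congr 1
    rw [pv_countP_sum]
    have hsub : Finset.range (xs.getD r "").toList.length ⊆ Finset.range (pvW xs) :=
      fun x hx => Finset.mem_range.mpr
        (lt_of_lt_of_le (Finset.mem_range.mp hx) (pv_len_le_W xs r hr))
    have hvan : ∀ c ∈ Finset.range (pvW xs), c ∉ Finset.range (xs.getD r "").toList.length →
        (if pvPt xs c r then (1 : Nat) else 0) = 0 := by
      intro c _ hc
      rw [if_neg]
      intro hpt
      exact absurd ((pv_point xs hpre c r hr).mp hpt).2.1 (by simpa using hc)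
    rw [← Finset.sum_subset hsub hvan]
    apply Finset.sum_congr rfl
    intro c hcm
    have hc : c < (xs.getD r "").toList.length := Finset.mem_range.mp hcm
    by_cases hh : pvHit (pvColWord (xs.getD r "").toList (xs.getD (r+1) "").toList
        (xs.getD (r+2) "").toList (xs.getD (r+3) "").toList c) = true
    · rw [if_pos hh, if_pos ((pv_point xs hpre c r hr).mpr ⟨h4, hc, hh⟩)]
    · rw [if_neg hh, if_neg (fun hpt => hh ((pv_point xs hpre c r hr).mp hpt).2.2)]
  · unfold pvHRow
    rw [if_neg h4]
    symm
    rw [Nat.cast_eq_zero]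
    apply Finset.sum_eq_zero
    intro c _
    rw [if_neg]
    intro hpt
    exact absurd ((pv_point xs hpre c r hr).mp hpt).1 h4

lemma pv_main (xs : List String) (hpre : Pre_find_xmas_instances_vertical xs) :
    find_xmas_instances_vertical xs = find_xmas_instances_vertical_alt xs := by
  rw [pv_a_eq, pv_alt_sum]
  have hA : ((List.range xs.length).map (pvHRow xs)).sum
      = ∑ r ∈ Finset.range xs.length, pvHRow xs r := rfl
  rw [hA]
  simp only [pv_cnt_col]
  rw [Finset.sum_congr rfl (fun r hrm => pv_hrow_sum xs hpre r (Finset.mem_range.mp hrm))]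
  rw [← Nat.cast_sum, ← Nat.cast_sum]
  congr 1
  exact Finset.sum_comm

-- ===== VERDICT (by name: the statement is the Claim_ definition above) =====
theorem find_xmas_instances_vertical_spec : Claim_equal_find_xmas_instances_vertical := by
  intro xs _ hpre
  unfold Spec_find_xmas_instances_vertical
  exact pv_main xs hpre
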